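-- pv_equiv track=rewrite | github.com/Daniel90mm/folkevalget | scripts/fetch_data.py | build_document_question_chain
-- ===== SOURCE A (Python) =====
-- from typing import Any
--
-- def dedupe_strings(values: list[str]) -> list[str]:
--     seen: set[str] = set()
--     result: list[str] = []
--     for value in values:
--         cleaned = str(value or "").strip()
--         if not cleaned:
--             continue
--         key = cleaned.casefold()
--         if key in seen:
--             continue
--         seen.add(key)
--         result.append(cleaned)
--     return result
--
-- def build_document_question_chain(actor_entries: list[dict[str, Any]]) -> dict[str, list[str]]:
--     askers: list[str] = []
--     responders: list[str] = []
--     for entry in actor_entries: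
--         role_text = str(entry.get("role") or "").lower()
--         actor_name = str(entry.get("name") or "").strip()
--         if not actor_name:
--             continue
--         if ("spørg" in role_text) or ("spoerg" in role_text) or ("spm" in role_text):
--             askers.append(actor_name)
--         if ("svar" in role_text) or ("besvar" in role_text):
--             responders.append(actor_name)
--     return {
--         "askers": dedupe_strings(askers),
--         "responders": dedupe_strings(responders),
--     }
-- ===== SOURCE B (Python) =====
-- def build_document_question_chain(actor_entries):
--     askers = []
--     responders = []
--     seen_askers = set()
--     seen_responders = set()
--     for entry in actor_entries:
--         role = str(entry.get("role") or "").lower()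
--         name = str(entry.get("name") or "").strip()
--         if not name:
--             continue
--         key = name.casefold()
--         if any(p in role for p in ("spørg", "spoerg", "spm")):
--             if key not in seen_askers:
--                 seen_askers.add(key)
--                 askers.append(name)
--         if "svar" in role:
--             if key not in seen_responders:
--                 seen_responders.add(key)
--                 responders.append(name)
--     return {"askers": askers, "responders": responders}
-- ===== Notes on version B (the rewrite author's own statement) =====
-- stated objective: simpler
-- what changed: B fuses classification and deduplication into a single traversal that maintains inline seen-sets (dropping A's separate dedupe_strings second pass and its redundant re-strip), and drops the redundant 'besvar' test since 'svar' is a substring of 'besvar'.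
import Mathlib
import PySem

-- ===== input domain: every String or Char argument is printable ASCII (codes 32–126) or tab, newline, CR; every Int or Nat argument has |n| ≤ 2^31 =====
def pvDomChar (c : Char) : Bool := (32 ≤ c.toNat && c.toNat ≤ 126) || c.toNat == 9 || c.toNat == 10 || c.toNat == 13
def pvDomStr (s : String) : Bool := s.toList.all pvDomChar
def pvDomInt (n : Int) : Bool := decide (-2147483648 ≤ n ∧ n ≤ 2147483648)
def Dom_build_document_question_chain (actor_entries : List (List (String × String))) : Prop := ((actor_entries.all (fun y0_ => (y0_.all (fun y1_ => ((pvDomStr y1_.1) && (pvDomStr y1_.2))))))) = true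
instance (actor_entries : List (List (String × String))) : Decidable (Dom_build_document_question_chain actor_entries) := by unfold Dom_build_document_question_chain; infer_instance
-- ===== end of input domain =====

-- B fuses classification and deduplication into one traversal with inline seen-sets (and drops the
-- redundant "besvar" test, since "svar" is a substring of "besvar"); objective: simpler, no second pass.
-- casefold is ported as lower: exact on the ASCII domain. `str(v or "")` on a string value is the value itself.

-- ===== PORT A =====
-- loop body of dedupe_strings
def pvDedupeStep (st : PySem.Set String × List String) (value : String) : PySem.Set String × List String :=
  let cleaned := PySem.Str.strip value
  if cleaned = "" then st
  else
    let key := PySem.Str.lower cleaned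
    if st.1.contains key then st else (st.1.add key, st.2 ++ [cleaned])

def dedupe_strings (values : List String) : List String :=
  (values.foldl pvDedupeStep (PySem.Set.empty, [])).2

-- loop body of A's pass over actor_entries
def pvAStep (st : List String × List String) (entry : List (String × String)) :
    List String × List String :=
  let role_text := PySem.Str.lower ((PySem.Dict.mk entry).getD "role" "")
  let actor_name := PySem.Str.strip ((PySem.Dict.mk entry).getD "name" "")
  if actor_name = "" then st
  else
    let st :=
      if PySem.Str.isIn "spørg" role_text || PySem.Str.isIn "spoerg" role_text
          || PySem.Str.isIn "spm" role_text then
        (st.1 ++ [actor_name], st.2)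
      else st
    if PySem.Str.isIn "svar" role_text || PySem.Str.isIn "besvar" role_text then
      (st.1, st.2 ++ [actor_name])
    else st

def build_document_question_chain (actor_entries : List (List (String × String))) :
    List (String × List String) :=
  let st := actor_entries.foldl pvAStep ([], [])
  [("askers", dedupe_strings st.1), ("responders", dedupe_strings st.2)]

-- ===== PORT B =====
-- loop body of B: one traversal, seen-sets maintained inline
def pvBStep (st : (PySem.Set String × List String) × (PySem.Set String × List String))
    (entry : List (String × String)) :
    (PySem.Set String × List String) × (PySem.Set String × List String) :=
  let role := PySem.Str.lower ((PySem.Dict.mk entry).getD "role" "")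
  let name := PySem.Str.strip ((PySem.Dict.mk entry).getD "name" "")
  if name = "" then st
  else
    let key := PySem.Str.lower name
    let stA :=
      if ["spørg", "spoerg", "spm"].any (fun p => PySem.Str.isIn p role) then
        if st.1.1.contains key then st.1 else (st.1.1.add key, st.1.2 ++ [name])
      else st.1
    let stR :=
      if PySem.Str.isIn "svar" role then
        if st.2.1.contains key then st.2 else (st.2.1.add key, st.2.2 ++ [name])
      else st.2
    (stA, stR)

def build_document_question_chain_alt (actor_entries : List (List (String × String))) :
    List (String × List String) :=
  let st := actor_entries.foldl pvBStep ((PySem.Set.empty, []), (PySem.Set.empty, []))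
  [("askers", st.1.2), ("responders", st.2.2)]

-- ===== PRECONDITION & SPEC =====
def Spec_build_document_question_chain (actor_entries : List (List (String × String))) (out : List (String × List String)) : Prop := out = build_document_question_chain_alt actor_entries
instance (actor_entries : List (List (String × String))) (out : List (String × List String)) : Decidable (Spec_build_document_question_chain actor_entries out) := by unfold Spec_build_document_question_chain; infer_instance

-- ===== CLAIM (what is proved, stated in full; the proofs are below) =====
def Claim_equal_build_document_question_chain : Prop := ∀ (actor_entries : List (List (String × String))), Dom_build_document_question_chain actor_entries → Spec_build_document_question_chain actor_entries (build_document_question_chain actor_entries)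

-- ===== LEMMAS AND PROOFS =====

-- the (at most one) name entry contributes to the asker / responder streams
def pvFA (entry : List (String × String)) : List String :=
  let role_text := PySem.Str.lower ((PySem.Dict.mk entry).getD "role" "")
  let actor_name := PySem.Str.strip ((PySem.Dict.mk entry).getD "name" "")
  if actor_name = "" then []
  else if PySem.Str.isIn "spørg" role_text || PySem.Str.isIn "spoerg" role_text
      || PySem.Str.isIn "spm" role_text then [actor_name]
  else []

def pvFR (entry : List (String × String)) : List String :=
  let role_text := PySem.Str.lower ((PySem.Dict.mk entry).getD "role" "")
  let actor_name := PySem.Str.strip ((PySem.Dict.mk entry).getD "name" "")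
  if actor_name = "" then []
  else if PySem.Str.isIn "svar" role_text || PySem.Str.isIn "besvar" role_text then [actor_name]
  else []

-- dedupe step for already-clean strings (no re-strip, no emptiness test)
def pvSimpleStep (st : PySem.Set String × List String) (x : String) :
    PySem.Set String × List String :=
  let key := PySem.Str.lower x
  if st.1.contains key then st else (st.1.add key, st.2 ++ [x])

theorem pv_dropWhile_strip_aux (p : Char → Bool) (l : List Char) :
    List.dropWhile p ((List.dropWhile p (List.dropWhile p l).reverse).reverse)
      = (List.dropWhile p (List.dropWhile p l).reverse).reverse := by
  cases hz : (List.dropWhile p (List.dropWhile p l).reverse).reverse with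
  | nil => simp
  | cons c t =>
    have hsuf : List.dropWhile p (List.dropWhile p l).reverse <:+ (List.dropWhile p l).reverse :=
      List.dropWhile_suffix p
    have hpre : (List.dropWhile p (List.dropWhile p l).reverse).reverse <+: List.dropWhile p l := by
      have := hsuf.reverse
      simpa using this
    rw [hz] at hpre
    rcases hpre with ⟨s, hs⟩
    have hne : List.dropWhile p l ≠ [] := by rw [← hs]; simp
    have h1 := List.head_dropWhile_not p (l := l) hne
    have hc : p c = false := by
      simp only [← hs, List.cons_append, List.head_cons] at h1
      exact h1
    simp [hc]

theorem pv_chars_strip_idem (l : List Char) :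
    PySem.Chars.strip (PySem.Chars.strip l) = PySem.Chars.strip l := by
  simp only [PySem.Chars.strip, PySem.Chars.lstrip, PySem.Chars.rstrip]
  rw [pv_dropWhile_strip_aux, List.reverse_reverse]
  exact pv_dropWhile_strip_aux _ l

theorem pv_strip_idem (s : String) : PySem.Str.strip (PySem.Str.strip s) = PySem.Str.strip s := by
  apply String.toList_injective
  simpa [PySem.Str.toList_strip] using pv_chars_strip_idem s.toList

-- A's fold appends exactly the pvFA / pvFR streams
theorem pvAStep_eq (st : List String × List String) (e : List (String × String)) :
    pvAStep st e = (st.1 ++ pvFA e, st.2 ++ pvFR e) := by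
  simp only [pvAStep, pvFA, pvFR]
  split_ifs <;> simp_all

theorem pvAFold_eq (entries : List (List (String × String))) :
    ∀ st : List String × List String,
      entries.foldl pvAStep st = (st.1 ++ entries.flatMap pvFA, st.2 ++ entries.flatMap pvFR) := by
  induction entries with
  | nil => intro st; simp
  | cons e es ih =>
    intro st
    simp only [List.foldl_cons, pvAStep_eq, ih, List.flatMap_cons, List.append_assoc]

-- on already-stripped non-empty strings A's dedupe step is pvSimpleStep
theorem pvDedupeFold_eq (xs : List String) :
    ∀ st, (∀ x ∈ xs, PySem.Str.strip x = x ∧ x ≠ "") →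
      xs.foldl pvDedupeStep st = xs.foldl pvSimpleStep st := by
  induction xs with
  | nil => intro st _; rfl
  | cons x xs ih =>
    intro st h
    obtain ⟨hx, hne⟩ := h x (List.mem_cons_self ..)
    have hrest := fun y hy => h y (List.mem_cons_of_mem _ hy)
    have hstep : pvDedupeStep st x = pvSimpleStep st x := by
      simp only [pvDedupeStep, pvSimpleStep, hx]
      simp [hne]
    simp only [List.foldl_cons, hstep]
    exact ih _ hrest

theorem pvFA_clean (e : List (String × String)) :
    ∀ x ∈ pvFA e, PySem.Str.strip x = x ∧ x ≠ "" := by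
  intro x hx
  simp only [pvFA] at hx
  split_ifs at hx <;> simp_all [pv_strip_idem]

theorem pvFR_clean (e : List (String × String)) :
    ∀ x ∈ pvFR e, PySem.Str.strip x = x ∧ x ≠ "" := by
  intro x hx
  simp only [pvFR] at hx
  split_ifs at hx <;> simp_all [pv_strip_idem]

-- "svar" is a substring of "besvar", so the second test of A's responder branch is redundant
theorem pv_svar_or (role : String) :
    (PySem.Str.isIn "svar" role || PySem.Str.isIn "besvar" role) = PySem.Str.isIn "svar" role := by
  cases hb : PySem.Str.isIn "besvar" role
  · simp
  · have hsub : ("svar" : String).toList <:+: ("besvar" : String).toList := by decide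
    have := List.IsInfix.trans hsub ((PySem.Str.isIn_iff_infix _ _).mp hb)
    have hs : PySem.Str.isIn "svar" role = true := (PySem.Str.isIn_iff_infix _ _).mpr this
    rw [Bool.or_true, hs]

-- B's fold is the simple dedupe fold of the two streams
theorem pvBFold_eq (entries : List (List (String × String))) :
    ∀ stA stR : PySem.Set String × List String,
      entries.foldl pvBStep (stA, stR)
        = ((entries.flatMap pvFA).foldl pvSimpleStep stA,
           (entries.flatMap pvFR).foldl pvSimpleStep stR) := by
  induction entries with
  | nil => intro stA stR; rfl
  | cons e es ih =>
    intro stA stR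
    simp only [List.foldl_cons, List.flatMap_cons, List.foldl_append]
    have hstep : pvBStep (stA, stR) e = (pvFA e |>.foldl pvSimpleStep stA,
        pvFR e |>.foldl pvSimpleStep stR) := by
      simp only [pvBStep, pvFA, pvFR, pv_svar_or,
        List.any_cons, List.any_nil, Bool.or_false]
      split_ifs <;> simp_all [pvSimpleStep]
    rw [hstep, ih]

-- ===== VERDICT (by name: the statement is the Claim_ definition above) =====
theorem build_document_question_chain_spec : Claim_equal_build_document_question_chain := by
  intro entries _
  unfold Spec_build_document_question_chain build_document_question_chain
    build_document_question_chain_alt dedupe_strings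
  rw [pvAFold_eq, pvBFold_eq]
  simp only [List.nil_append]
  rw [pvDedupeFold_eq _ _ (by intro x hx; exact pvFA_clean _ x ((List.mem_flatMap.mp hx).choose_spec.2)),
      pvDedupeFold_eq _ _ (by intro x hx; exact pvFR_clean _ x ((List.mem_flatMap.mp hx).choose_spec.2))]
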